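-- pv_equiv track=rewrite | github.com/JustBati/Teoria-de-los-automatas | Regular expresion protocol/Protocolo.py | Paridad
-- ===== SOURCE A (Python) =====
-- def Paridad(cadena):
--     q=0
--     for j in cadena:
--         #Primer nodo y estado final
--         if(q==0 and j=='0'):
--             q=2
--         elif(q==0 and j=='0'):
--             q=1
--         #Segundo nodo
--         elif(q==1 and j=='0'):
--             q=2
--         elif(q==1 and j=='1'):
--             q=0
--         #Tercer nodo
--         elif(q==2 and j=='1'):
--             q=2
--         elif(q==2 and j=='0'):
--             q=0
--         #Cuarto nodo
--         elif(q==2 and j=='1'):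
--             q=2
--         elif(q==2 and j=='0'):
--             q=0
--     return q
-- ===== SOURCE B (Python) =====
-- def Paridad(cadena):
--     # Parity of '0's: the DFA only toggles between 0 and 2 on '0'.
--     n = sum(1 for c in cadena if c == '0')
--     return 2 if n % 2 == 1 else 0
-- ===== Notes on version B (the rewrite author's own statement) =====
-- stated objective: simpler
-- what changed: Replaced the explicit DFA state machine (with unreachable duplicate branches) by counting characters equal to '0' and returning 2 on odd parity, 0 on even.
import Mathlib
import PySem

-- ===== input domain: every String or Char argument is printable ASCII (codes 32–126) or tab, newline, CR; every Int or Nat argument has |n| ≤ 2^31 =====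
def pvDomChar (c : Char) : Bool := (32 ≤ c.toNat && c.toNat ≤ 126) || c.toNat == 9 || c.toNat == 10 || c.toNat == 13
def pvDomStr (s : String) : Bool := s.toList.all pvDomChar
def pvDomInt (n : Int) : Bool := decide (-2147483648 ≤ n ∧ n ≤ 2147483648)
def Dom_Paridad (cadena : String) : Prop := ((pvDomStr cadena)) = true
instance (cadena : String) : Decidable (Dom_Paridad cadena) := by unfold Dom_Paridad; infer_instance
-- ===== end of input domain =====

-- B replaces A's explicit DFA transition chain by the parity of the count of '0' characters (simpler).

-- ===== PORT A =====
def ParidadStep (q : Int) (j : Char) : Int :=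
  if q == 0 && j == '0' then 2
  else if q == 0 && j == '0' then 1
  else if q == 1 && j == '0' then 2
  else if q == 1 && j == '1' then 0
  else if q == 2 && j == '1' then 2
  else if q == 2 && j == '0' then 0
  else if q == 2 && j == '1' then 2
  else if q == 2 && j == '0' then 0
  else q

def Paridad (cadena : String) : Int :=
  cadena.toList.foldl ParidadStep 0

-- ===== PORT B =====
def Paridad_alt (cadena : String) : Int :=
  let n : Int := cadena.toList.foldl (fun acc c => if c == '0' then acc + 1 else acc) 0
  if n % 2 == 1 then 2 else 0

-- ===== PRECONDITION & SPEC =====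
def Spec_Paridad (cadena : String) (out : Int) : Prop := out = Paridad_alt cadena
instance (cadena : String) (out : Int) : Decidable (Spec_Paridad cadena out) := by unfold Spec_Paridad; infer_instance

-- ===== CLAIM (what is proved, stated in full; the proofs are below) =====
def Claim_equal_Paridad : Prop := ∀ (cadena : String), Dom_Paridad cadena → Spec_Paridad cadena (Paridad cadena)

-- ===== LEMMAS AND PROOFS =====

-- A's fold toggles q between 0 and 2 on '0', so it is determined by parity of count.
theorem paridad_fold (l : List Char) (n : Int) :
    l.foldl ParidadStep (if n % 2 == 1 then 2 else 0)
      = (if (l.foldl (fun acc c => if c == '0' then acc + 1 else acc) n) % 2 == 1 then 2 else 0) := by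
  induction l generalizing n with
  | nil => rfl
  | cons c t ih =>
    simp only [List.foldl]
    by_cases h : c = '0'
    · subst h
      have : ParidadStep (if n % 2 == 1 then 2 else 0) '0'
          = (if (n + 1) % 2 == 1 then 2 else 0) := by
        simp only [ParidadStep]
        rcases Int.emod_two_eq_zero_or_one n with h0 | h0 <;>
          simp [h0, Int.add_emod]
      rw [this, ih]
      simp
    · have hc : (c == '0') = false := by simp [h]
      have : ParidadStep (if n % 2 == 1 then 2 else 0) c
          = (if n % 2 == 1 then 2 else 0) := by
        simp only [ParidadStep]
        split_ifs with h1 h2 h3 h4 h5 <;> simp_all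
      rw [this]
      simp only [hc, Bool.false_eq_true, if_false]
      exact ih n

-- ===== VERDICT (by name: the statement is the Claim_ definition above) =====
theorem Paridad_spec : Claim_equal_Paridad := by
  intro cadena _
  unfold Spec_Paridad Paridad Paridad_alt
  have := paridad_fold cadena.toList 0
  simpa using this
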